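-- pv_equiv track=rewrite | github.com/slebok/slebok.github.io | dyol/csv2dsl.py | emph
-- ===== SOURCE A (Python) =====
-- def emph(x):
-- 	y = x.split('__')
-- 	r = y[0]
-- 	closed = True
-- 	for i in range(1,len(y)):
-- 		if closed:
-- 			r += '<em>' + y[i]
-- 		else:
-- 			r += '</em>' + y[i]
-- 		closed = not closed
-- 	return r
-- ===== SOURCE B (Python) =====
-- def emph(x):
--     out = []
--     closed = True
--     i = 0
--     n = len(x)
--     while i < n:
--         if x.startswith('__', i):
--             out.append('<em>' if closed else '</em>')
--             closed = not closed
--             i += 2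
--         else:
--             out.append(x[i])
--             i += 1
--     return ''.join(out)
-- ===== Notes on version B (the rewrite author's own statement) =====
-- stated objective: alternative
-- what changed: B replaces split-into-segments-then-rejoin-with-alternating-tags by a single left-to-right character scan that emits an alternating tag at each non-overlapping '__' occurrence and copies every other character.
import Mathlib
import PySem

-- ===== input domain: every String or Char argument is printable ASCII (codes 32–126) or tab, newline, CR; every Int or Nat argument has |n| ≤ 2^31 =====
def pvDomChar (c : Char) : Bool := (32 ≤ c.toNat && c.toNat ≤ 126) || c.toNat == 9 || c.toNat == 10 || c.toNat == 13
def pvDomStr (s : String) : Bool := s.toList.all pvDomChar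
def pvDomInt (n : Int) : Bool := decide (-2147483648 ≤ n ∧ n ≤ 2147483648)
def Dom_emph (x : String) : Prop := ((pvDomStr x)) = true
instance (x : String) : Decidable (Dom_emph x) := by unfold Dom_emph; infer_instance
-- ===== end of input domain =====

-- B changes the algorithm: a single character scan inserting alternating tags at each '__',
-- instead of A's split on '__' followed by an indexed rejoin loop. Same cost, no speed claim.

-- ===== PORT A =====
-- loop body of A: r += ('<em>' if closed else '</em>') + y[i]; closed = not closed
def stepA (st : List Char × Bool) (seg : List Char) : List Char × Bool :=
  if st.2 then (st.1 ++ "<em>".toList ++ seg, !st.2)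
  else (st.1 ++ "</em>".toList ++ seg, !st.2)

-- A: y = x.split('__'); r = y[0]; for i in range(1, len(y)): <stepA>
def emph (x : String) : String :=
  let y : List (List Char) := PySem.Chars.splitOn x.toList ['_', '_']
  -- y[0]: split always returns a non-empty list, so headD's default is never used
  let r0 : List Char := y.headD []
  let st := (PySem.List.pyRange 1 (y.length : Int) 1).foldl
      (fun st i => stepA st (PySem.List.pyGetD y i [])) (r0, true)
  String.ofList st.1

-- ===== PORT B =====
-- B's while loop: at each position, if the string starts with '__' here emit the alternating
-- tag and skip two characters, otherwise copy one character.
def emphGo : List Char → Bool → List Char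
  | [], _ => []
  | '_' :: '_' :: rest, closed =>
      (if closed then "<em>".toList else "</em>".toList) ++ emphGo rest (!closed)
  | c :: rest, closed => c :: emphGo rest closed

def emph_alt (x : String) : String := String.ofList (emphGo x.toList true)

-- ===== PRECONDITION & SPEC =====
def Spec_emph (x : String) (out : String) : Prop := out = emph_alt x
instance (x : String) (out : String) : Decidable (Spec_emph x out) := by unfold Spec_emph; infer_instance

-- ===== CLAIM (what is proved, stated in full; the proofs are below) =====
def Claim_equal_emph : Prop := ∀ (x : String), Dom_emph x → Spec_emph x (emph x)

-- ===== LEMMAS AND PROOFS =====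

-- fuel-free restatement of Python's split on '__'
def mySplit : List Char → List (List Char)
  | [] => [[]]
  | '_' :: '_' :: rest => [] :: mySplit rest
  | c :: rest =>
    match mySplit rest with
    | [] => [[c]]
    | h :: t => (c :: h) :: t

def consAll (pre : List Char) : List (List Char) → List (List Char)
  | [] => [pre]
  | h :: t => (pre ++ h) :: t

def tagOf (closed : Bool) : List Char := if closed then "<em>".toList else "</em>".toList

def interAlt : List (List Char) → Bool → List Char
  | [], _ => []
  | s :: rest, closed => tagOf closed ++ s ++ interAlt rest (!closed)

lemma mySplit_ne_nil (l : List Char) : mySplit l ≠ [] := by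
  fun_induction mySplit l with
  | case1 => simp
  | case2 => simp
  | case3 c rest h ih hm => simp
  | case4 c rest h h' t hm ih => simp

lemma consAll_nil_of_ne_nil (m : List (List Char)) (h : m ≠ []) : consAll [] m = m := by
  cases m with
  | nil => exact absurd rfl h
  | cons a t => simp [consAll]

lemma mySplit_single (c : Char) : mySplit [c] = [[c]] := by
  simp [mySplit]

lemma mySplit_cons2 (c d : Char) (rest : List Char) (hne : ¬ (c = '_' ∧ d = '_')) :
    mySplit (c :: d :: rest) =
      match mySplit (d :: rest) with
      | [] => [[c]]
      | h :: t => (c :: h) :: t := by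
  rw [mySplit.eq_def]
  split
  · simp_all
  · rename_i r' heq
    injection heq with hc hrest
    injection hrest with hd _
    exact absurd ⟨hc, hd⟩ hne
  · rename_i c' rest' hnot heq
    injection heq with hc hrest
    rw [hc, hrest]

lemma emphGo_single (c : Char) (closed : Bool) : emphGo [c] closed = [c] := by
  simp [emphGo]

lemma emphGo_cons2 (c d : Char) (rest : List Char) (closed : Bool)
    (hne : ¬ (c = '_' ∧ d = '_')) :
    emphGo (c :: d :: rest) closed = c :: emphGo (d :: rest) closed := by
  rw [emphGo.eq_def]
  split
  · simp_all
  · rename_i r' heq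
    injection heq with hc hrest
    injection hrest with hd _
    exact absurd ⟨hc, hd⟩ hne
  · rename_i c' rest' hnot heq
    injection heq with hc hrest
    rw [hc, hrest]

lemma go_spec (fuel : Nat) : ∀ (l cur : List Char) (acc : List (List Char)),
    l.length < fuel →
    PySem.Chars.splitOn.go ['_', '_'] fuel l cur acc = acc.reverse ++ consAll cur.reverse (mySplit l) := by
  induction fuel with
  | zero => intro l cur acc h; omega
  | succ fuel ih =>
    intro l cur acc h
    match l with
    | [] => simp [PySem.Chars.splitOn.go, mySplit, consAll]
    | [c] =>
      have hp : List.isPrefixOf ['_', '_'] [c] = false := by simp [List.isPrefixOf]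
      simp only [PySem.Chars.splitOn.go, hp, Bool.false_eq_true, if_false]
      rw [ih [] (c :: cur) acc (by simp at h ⊢; omega)]
      simp [mySplit_single, mySplit, consAll]
    | c :: d :: rest =>
      by_cases hcd : c = '_' ∧ d = '_'
      · obtain ⟨hc, hd⟩ := hcd; subst hc; subst hd
        have hp : List.isPrefixOf ['_', '_'] ('_' :: '_' :: rest) = true := by
          simp [List.isPrefixOf]
        simp only [PySem.Chars.splitOn.go, hp, if_pos]
        rw [show List.drop ['_', '_'].length ('_' :: '_' :: rest) = rest from rfl]
        rw [ih rest [] (cur.reverse :: acc) (by simp at h ⊢; omega)]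
        simp only [List.reverse_nil, List.reverse_cons]
        rw [consAll_nil_of_ne_nil _ (mySplit_ne_nil rest)]
        simp [mySplit, consAll]
      · have hp : List.isPrefixOf ['_', '_'] (c :: d :: rest) = false := by
          simp only [List.isPrefixOf, Bool.and_true, Bool.and_eq_false_iff, beq_eq_false_iff_ne, ne_eq]
          tauto
        simp only [PySem.Chars.splitOn.go, hp, Bool.false_eq_true, if_false]
        rw [ih (d :: rest) (c :: cur) acc (by simp at h ⊢; omega)]
        rw [mySplit_cons2 c d rest hcd]
        rcases hx : mySplit (d :: rest) with _ | ⟨hh, tt⟩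
        · exact absurd hx (mySplit_ne_nil (d :: rest))
        · simp [consAll]

lemma splitOn_eq (cs : List Char) :
    PySem.Chars.splitOn cs ['_', '_'] = mySplit cs := by
  unfold PySem.Chars.splitOn
  rw [go_spec (cs.length + 1) cs [] [] (by omega)]
  simpa using consAll_nil_of_ne_nil _ (mySplit_ne_nil cs)

lemma foldl_interAlt (l : List (List Char)) : ∀ (r : List Char) (closed : Bool),
    (l.foldl stepA (r, closed)).1 = r ++ interAlt l closed := by
  induction l with
  | nil => intro r closed; simp [interAlt]
  | cons s rest ih =>
    intro r closed
    cases closed with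
    | true =>
      rw [List.foldl_cons, show stepA (r, true) s = (r ++ "<em>".toList ++ s, false) from by
        simp [stepA], ih]
      simp [interAlt, tagOf]
    | false =>
      rw [List.foldl_cons, show stepA (r, false) s = (r ++ "</em>".toList ++ s, true) from by
        simp [stepA], ih]
      simp [interAlt, tagOf]

lemma emphGo_cons (c : Char) (rest : List Char) (closed : Bool)
    (hne : ∀ r', c = '_' → rest = '_' :: r' → False) :
    emphGo (c :: rest) closed = c :: emphGo rest closed := by
  rcases rest with _ | ⟨d, rest'⟩
  · simp [emphGo_single, emphGo]
  · exact emphGo_cons2 c d rest' closed (fun ⟨h1, h2⟩ => hne rest' h1 (by rw [h2]))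

lemma emphGo_eq (cs : List Char) : ∀ (closed : Bool),
    (mySplit cs).headD [] ++ interAlt (mySplit cs).tail closed = emphGo cs closed := by
  fun_induction mySplit cs with
  | case1 => intro closed; simp [emphGo, interAlt]
  | case2 rest ih =>
    intro closed
    simp only [List.headD_cons, List.tail_cons, List.nil_append]
    obtain ⟨h, t, hm⟩ : ∃ h t, mySplit rest = h :: t := by
      rcases hx : mySplit rest with _ | ⟨h, t⟩
      · exact absurd hx (mySplit_ne_nil rest)
      · exact ⟨h, t, rfl⟩
    rw [show emphGo ('_' :: '_' :: rest) closed = tagOf closed ++ emphGo rest (!closed) from by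
      cases closed <;> simp [emphGo, tagOf]]
    rw [← ih (!closed)]
    simp [hm, interAlt]
  | case3 c rest hne hm ih => exact absurd hm (mySplit_ne_nil rest)
  | case4 c rest hne h t hm ih =>
    intro closed
    simp only [List.headD_cons, List.tail_cons]
    rw [emphGo_cons c rest closed hne, ← ih closed, hm]
    simp

-- ===== VERDICT (by name: the statement is the Claim_ definition above) =====
theorem emph_spec : Claim_equal_emph := by
  intro x _
  unfold Spec_emph emph emph_alt
  simp only [splitOn_eq]
  rw [PySem.List.foldl_pyRange_pyGetD' (mySplit x.toList) [] stepA ((mySplit x.toList).headD [], true) (a := 1) (by norm_num)]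
  rw [show ((1 : Int).toNat) = 1 from rfl]
  rw [foldl_interAlt]
  rw [show (mySplit x.toList).drop 1 = (mySplit x.toList).tail from by simp [List.drop_one]]
  rw [emphGo_eq]
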